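-- pv_equiv track=rewrite | github.com/etri-edgeai/nn-comp | examples/image_classification/curl.py | get_vindices
-- ===== SOURCE A (Python) =====
-- def get_vindices(lidx, group_struct):
--     vindices = set([lidx])
--     last = len(vindices)
--     initial_run = True
--     visited = set()
--     while initial_run or (not last == len(vindices)):
--         initial_run = False
--         last = len(vindices)
--
--         for key, val in group_struct[0].items():
--             if type(key) == str and key not in visited:
--                 val = sorted(val, key=lambda x:x[0])
--                 for vidx in list(vindices):
--                     found = False
--                     for v in val:
--                         if v[0] <= vidx and vidx < v[1]:
--                             found = True
--                             relative = vidx - v[0]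
--                             break
--                     if found:
--                         visited.add(key)
--                         for v in val:
--                             vindices.add(v[0]+relative)
--     return vindices
-- ===== SOURCE B (Python) =====
-- def get_vindices(lidx, group_struct):
--     # Incremental frontier propagation: sort each key's intervals once, keep the
--     # index set as an insertion-ordered list with a per-key cursor into it, and on
--     # each round a pending key only examines indices added since it last looked
--     # (older ones already failed and the intervals never change), instead of A's
--     # full rescan of every index against every key with a re-sort on every round.
--     order = [lidx]
--     seen = {lidx}
--     pending = [(sorted(val, key=lambda x: x[0]), 0)
--                for key, val in group_struct[0].items() if type(key) == str]
--     while True: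
--         before = len(order)
--         nxt = []
--         for val, cur in pending:
--             rels = []
--             for vidx in order[cur:]:
--                 for v in val:
--                     if v[0] > vidx:
--                         break
--                     if vidx < v[1]:
--                         rels.append(vidx - v[0])
--                         break
--             if rels:
--                 for rel in rels:
--                     for v in val:
--                         x = v[0] + rel
--                         if x not in seen:
--                             seen.add(x)
--                             order.append(x)
--             else:
--                 nxt.append((val, len(order)))
--         pending = nxt
--         if len(order) == before:
--             return seen
-- ===== Notes on version B (the rewrite author's own statement) =====
-- stated objective: alternative
-- what changed: B replaces A's per-round full rescan (with a re-sort of every interval list each round) by incremental frontier propagation: intervals are sorted once, the index set is kept as an insertion-ordered list, and each pending key holds a cursor so a round only checks the indices added since that key last looked.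
import Mathlib
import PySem

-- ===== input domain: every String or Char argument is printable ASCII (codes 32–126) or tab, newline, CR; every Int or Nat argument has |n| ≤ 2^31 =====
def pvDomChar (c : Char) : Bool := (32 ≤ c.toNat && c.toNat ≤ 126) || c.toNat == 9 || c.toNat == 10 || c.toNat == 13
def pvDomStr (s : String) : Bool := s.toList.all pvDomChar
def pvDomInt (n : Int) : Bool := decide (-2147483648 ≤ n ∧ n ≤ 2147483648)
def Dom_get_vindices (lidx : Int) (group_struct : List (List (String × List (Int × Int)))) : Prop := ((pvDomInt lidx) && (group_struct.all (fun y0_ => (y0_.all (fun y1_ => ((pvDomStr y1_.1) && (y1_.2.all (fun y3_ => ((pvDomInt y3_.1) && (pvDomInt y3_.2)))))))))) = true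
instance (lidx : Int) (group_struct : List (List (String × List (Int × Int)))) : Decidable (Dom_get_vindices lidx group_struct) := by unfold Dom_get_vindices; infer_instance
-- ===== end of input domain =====

-- B replaces A's per-round full rescan (which also re-sorts every interval list each
-- round) by incremental frontier propagation: sort once, keep the index set as an
-- insertion-ordered list, and give every pending key a cursor into it so a round only
-- checks indices added since that key last looked; return-value equivalence only.

-- ===== PORT A =====

-- inner 'for v in val: if v[0] <= vidx and vidx < v[1]: found/relative/break'
def pvFindA (val : List (Int × Int)) (vidx : Int) : Option Int :=
  match val with
  | [] => none
  | v :: rest => if v.1 ≤ vidx ∧ vidx < v.2 then some (vidx - v.1) else pvFindA rest vidx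

-- 'for v in val: vindices.add(v[0]+relative)'
def pvAddAllA (val : List (Int × Int)) (relative : Int) (vind : PySem.Set Int) : PySem.Set Int :=
  val.foldl (fun s v => PySem.Set.add s (v.1 + relative)) vind

-- 'for vidx in list(vindices): …' (the snapshot is the fold's list argument)
def pvInnerA (key : String) (val : List (Int × Int)) (snapshot : List Int)
    (st : PySem.Set Int × PySem.Set String) : PySem.Set Int × PySem.Set String :=
  snapshot.foldl (fun st vidx =>
    match pvFindA val vidx with
    | none => st
    | some relative => (pvAddAllA val relative st.1, PySem.Set.add st.2 key)) st

-- one pass of 'for key, val in group_struct[0].items(): …' ('type(key) == str' is always true here)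
def pvPassA : List (String × List (Int × Int)) → PySem.Set Int × PySem.Set String → PySem.Set Int × PySem.Set String
  | [], st => st
  | kv :: rest, st =>
    if PySem.Set.contains st.2 kv.1 then pvPassA rest st
    else pvPassA rest (pvInnerA kv.1 (PySem.List.sorted kv.2 (fun x => x.1)) st.1 st)

-- the 'while initial_run or last != len(vindices)' loop; the fuel items.length + 1
-- bounds the number of passes (each continuing pass fires at least one fresh key)
def pvLoopA (items : List (String × List (Int × Int))) :
    Nat → PySem.Set Int × PySem.Set String → PySem.Set Int
  | 0, st => st.1
  | fuel + 1, st =>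
    let st' := pvPassA items st
    if st'.1.length = st.1.length then st'.1 else pvLoopA items fuel st'

def get_vindices (lidx : Int) (group_struct : List (List (String × List (Int × Int)))) : List Int :=
  match PySem.List.pyGet? group_struct 0 with
  | none => []   -- IndexError in Python; excluded by Pre_
  | some g0 =>
    let items := (PySem.Dict.ofList g0).items
    pvLoopA items (items.length + 1) (PySem.Set.ofList [lidx], PySem.Set.empty)

-- ===== PORT B =====

-- the early-breaking containment scan 'for v in val: if v[0] > vidx: break; if vidx < v[1]: rels.append…; break'
def pvFindB (val : List (Int × Int)) (vidx : Int) : Option Int :=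
  match val with
  | [] => none
  | v :: rest =>
    if v.1 > vidx then none
    else if vidx < v.2 then some v.1
    else pvFindB rest vidx

-- 'rels = []; for vidx in order[cur:]: …'
def pvRelsB (val : List (Int × Int)) (delta : List Int) : List Int :=
  delta.filterMap (fun vidx => (pvFindB val vidx).map (fun v0 => vidx - v0))

-- 'for rel in rels: for v in val: x = v[0]+rel; if x not in seen: append' (= ordered-set add)
def pvFireB (val : List (Int × Int)) (rels : List Int) (s : PySem.Set Int) : PySem.Set Int :=
  rels.foldl (fun s rel => val.foldl (fun s v => PySem.Set.add s (v.1 + rel)) s) s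

-- one round over the pending entries (sorted intervals, cursor), building nxt
def pvPassB : List (List (Int × Int) × Nat) → PySem.Set Int → PySem.Set Int × List (List (Int × Int) × Nat)
  | [], vset => (vset, [])
  | ent :: rest, vset =>
    let rels := pvRelsB ent.1 (vset.drop ent.2)
    if rels.isEmpty then
      let r := pvPassB rest vset
      (r.1, (ent.1, vset.length) :: r.2)
    else pvPassB rest (pvFireB ent.1 rels vset)

-- 'while True: …'; the fuel pending.length + 1 bounds the rounds (growth only comes
-- from a firing entry, and a fired entry leaves the pending list for good)
def pvLoopB : Nat → PySem.Set Int → List (List (Int × Int) × Nat) → PySem.Set Int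
  | 0, vset, _ => vset
  | fuel + 1, vset, pending =>
    let r := pvPassB pending vset
    if r.1.length = vset.length then r.1 else pvLoopB fuel r.1 r.2

def get_vindices_alt (lidx : Int) (group_struct : List (List (String × List (Int × Int)))) : List Int :=
  match PySem.List.pyGet? group_struct 0 with
  | none => []   -- IndexError in Python; excluded by Pre_
  | some g0 =>
    let items := (PySem.Dict.ofList g0).items
    pvLoopB (items.length + 1) (PySem.Set.ofList [lidx])
      (items.map (fun kv => (PySem.List.sorted kv.2 (fun x => x.1), 0)))

-- ===== PRECONDITION & SPEC =====
-- A evaluates group_struct[0], an IndexError on the empty list; nothing else raises.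
def Pre_get_vindices (lidx : Int) (group_struct : List (List (String × List (Int × Int)))) : Prop :=
  group_struct ≠ []
instance (lidx : Int) (group_struct : List (List (String × List (Int × Int)))) : Decidable (Pre_get_vindices lidx group_struct) := by unfold Pre_get_vindices; infer_instance

def pvWitness_get_vindices : Int × (List (List (String × List (Int × Int)))) :=
  (2, [[("a", [(0, 3), (10, 13)]), ("b", [(11, 12), (20, 21)])]])

def Spec_get_vindices (lidx : Int) (group_struct : List (List (String × List (Int × Int)))) (out : List Int) : Prop := out = get_vindices_alt lidx group_struct
instance (lidx : Int) (group_struct : List (List (String × List (Int × Int)))) (out : List Int) : Decidable (Spec_get_vindices lidx group_struct out) := by unfold Spec_get_vindices; infer_instance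

-- ===== CLAIM (what is proved, stated in full; the proofs are below) =====
def Claim_equal_get_vindices : Prop := ∀ (lidx : Int) (group_struct : List (List (String × List (Int × Int)))), Dom_get_vindices lidx group_struct → Pre_get_vindices lidx group_struct → Spec_get_vindices lidx group_struct (get_vindices lidx group_struct)

-- ===== LEMMAS AND PROOFS =====

-- the unvisited keys' sorted interval lists, in dict order (what B's pending carries)
def pvFilt (items : List (String × List (Int × Int))) (vis : PySem.Set String) : List (List (Int × Int)) :=
  (items.filter (fun kv => !(PySem.Set.contains vis kv.1))).map (fun kv => PySem.List.sorted kv.2 (fun x => x.1))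

-- a cursor is valid when everything before it has already failed the containment test
def pvValid (ent : List (Int × Int) × Nat) (vset : List Int) : Prop :=
  ent.2 ≤ vset.length ∧ ∀ x ∈ vset.take ent.2, pvFindA ent.1 x = none

theorem pvSetMemAdd (s : PySem.Set String) (x y : String) (h : PySem.Set.contains s y = true) :
    PySem.Set.contains (PySem.Set.add s x) y = true := by
  by_cases hx : x ∈ s <;> simp_all [PySem.Set.add, PySem.Set.contains]

theorem pvSetContainsAdd (s : PySem.Set String) (x y : String) :
    PySem.Set.contains (PySem.Set.add s x) y = true → y = x ∨ PySem.Set.contains s y = true := by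
  by_cases hx : x ∈ s <;> intro h <;> simp_all [PySem.Set.add, PySem.Set.contains] <;> tauto

theorem pvSetContainsAddSelf (s : PySem.Set String) (x : String) :
    PySem.Set.contains (PySem.Set.add s x) x = true := by
  by_cases h : x ∈ s <;> simp [PySem.Set.add, PySem.Set.contains, h]

theorem pvSetContainsAddNe (s : PySem.Set String) (x y : String) (h : y ≠ x) :
    PySem.Set.contains (PySem.Set.add s x) y = PySem.Set.contains s y := by
  by_cases hx : x ∈ s <;> simp [PySem.Set.add, PySem.Set.contains, hx, h]

theorem pvFindA_none_of_lt (val : List (Int × Int)) (vidx : Int)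
    (h : ∀ w ∈ val, vidx < w.1) : pvFindA val vidx = none := by
  induction val with
  | nil => rfl
  | cons v rest ih =>
    have hv := h v (by simp)
    simp only [pvFindA]
    rw [if_neg (by omega)]
    exact ih (fun w hw => h w (by simp [hw]))

theorem pvFind_eq (val : List (Int × Int)) (vidx : Int)
    (hs : val.Pairwise (fun a b => a.1 ≤ b.1)) :
    (pvFindB val vidx).map (fun v0 => vidx - v0) = pvFindA val vidx := by
  induction val with
  | nil => rfl
  | cons v rest ih =>
    rw [List.pairwise_cons] at hs
    simp only [pvFindA, pvFindB]
    by_cases h1 : v.1 > vidx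
    · rw [if_pos h1, if_neg (by omega)]
      rw [pvFindA_none_of_lt rest vidx (fun w hw => lt_of_lt_of_le h1 (hs.1 w hw))]
      rfl
    · rw [if_neg h1]
      by_cases h2 : vidx < v.2
      · rw [if_pos h2, if_pos (by omega)]; rfl
      · rw [if_neg h2, if_neg (by omega)]
        exact ih hs.2

theorem pvInner_eq (key : String) (val : List (Int × Int)) (snapshot : List Int)
    (vind : PySem.Set Int) (vis : PySem.Set String) :
    pvInnerA key val snapshot (vind, vis) =
      ((snapshot.filterMap (pvFindA val)).foldl (fun s rel => pvAddAllA val rel s) vind,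
       if (snapshot.filterMap (pvFindA val)).isEmpty then vis else PySem.Set.add vis key) := by
  induction snapshot generalizing vind vis with
  | nil => rfl
  | cons vidx rest ih =>
    simp only [pvInnerA, List.foldl_cons, List.filterMap_cons] at *
    rcases Option.eq_none_or_eq_some (pvFindA val vidx) with h | ⟨rel, h⟩ <;> simp only [h]
    · exact ih vind vis
    · rw [ih (pvAddAllA val rel vind) (PySem.Set.add vis key)]
      simp

theorem pvPassA_vis_mono (items : List (String × List (Int × Int)))
    (vind : PySem.Set Int) (vis : PySem.Set String) (x : String)
    (h : PySem.Set.contains vis x = true) :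
    PySem.Set.contains (pvPassA items (vind, vis)).2 x = true := by
  induction items generalizing vind vis with
  | nil => exact h
  | cons kv rest ih =>
    simp only [pvPassA]
    split_ifs with hc
    · exact ih vind vis h
    · rw [pvInner_eq]
      split_ifs with he
      · exact ih _ _ h
      · exact ih _ _ (pvSetMemAdd vis kv.1 x h)

theorem pvPassA_vis_bound (items : List (String × List (Int × Int)))
    (vind : PySem.Set Int) (vis : PySem.Set String) (x : String)
    (h : PySem.Set.contains (pvPassA items (vind, vis)).2 x = true) :
    PySem.Set.contains vis x = true ∨ x ∈ items.map (·.1) := by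
  induction items generalizing vind vis with
  | nil => exact Or.inl h
  | cons kv rest ih =>
    simp only [pvPassA] at h
    simp only [List.map_cons, List.mem_cons]
    split_ifs at h with hc
    · rcases ih vind vis h with h' | h'
      · exact Or.inl h'
      · exact Or.inr (Or.inr h')
    · rw [pvInner_eq] at h
      split_ifs at h with he
      · rcases ih _ _ h with h' | h'
        · exact Or.inl h'
        · exact Or.inr (Or.inr h')
      · rcases ih _ _ h with h' | h'
        · rcases pvSetContainsAdd vis kv.1 x h' with h'' | h''
          · exact Or.inr (Or.inl h'')
          · exact Or.inl h''
        · exact Or.inr (Or.inr h')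

theorem pvFilt_cons_skip (kv : String × List (Int × Int)) (rest : List (String × List (Int × Int)))
    (vis : PySem.Set String) (h : PySem.Set.contains vis kv.1 = true) :
    pvFilt (kv :: rest) vis = pvFilt rest vis := by
  have h' : kv.1 ∈ vis := by simpa [PySem.Set.contains] using h
  simp [pvFilt, h']

theorem pvFilt_cons_keep (kv : String × List (Int × Int)) (rest : List (String × List (Int × Int)))
    (vis : PySem.Set String) (h : ¬ PySem.Set.contains vis kv.1 = true) :
    pvFilt (kv :: rest) vis = PySem.List.sorted kv.2 (fun x => x.1) :: pvFilt rest vis := by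
  have h' : kv.1 ∉ vis := by simpa [PySem.Set.contains] using h
  simp [pvFilt, h']

theorem pvFilt_add_of_not_mem (rest : List (String × List (Int × Int)))
    (vis : PySem.Set String) (k : String) (h : k ∉ rest.map (·.1)) :
    pvFilt rest (PySem.Set.add vis k) = pvFilt rest vis := by
  unfold pvFilt
  congr 1
  apply List.filter_congr
  intro kv hkv
  have : kv.1 ≠ k := fun he => h (by simp; exact ⟨kv.2, by rwa [← he]⟩)
  rw [pvSetContainsAddNe vis k kv.1 this]

theorem pvFilt_empty (items : List (String × List (Int × Int))) :
    pvFilt items PySem.Set.empty = items.map (fun kv => PySem.List.sorted kv.2 (fun x => x.1)) := by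
  simp [pvFilt, PySem.Set.empty, PySem.Set.contains]

-- the index list only ever grows at the back
theorem pvPrefix_add (s : PySem.Set Int) (x : Int) : s <+: PySem.Set.add s x := by
  rw [PySem.Set.add_eq_ite]
  split_ifs
  · exact List.prefix_refl s
  · exact List.prefix_append s [x]

theorem pvPrefix_addAll (val : List (Int × Int)) (rel : Int) :
    ∀ s : PySem.Set Int, s <+: val.foldl (fun s v => PySem.Set.add s (v.1 + rel)) s := by
  induction val with
  | nil => intro s; exact List.prefix_refl s
  | cons v rest ih =>
    intro s
    exact (pvPrefix_add s (v.1 + rel)).trans (by simpa using ih (PySem.Set.add s (v.1 + rel)))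

theorem pvPrefix_fire (val : List (Int × Int)) (rels : List Int) :
    ∀ s : PySem.Set Int, s <+: pvFireB val rels s := by
  induction rels with
  | nil => intro s; exact List.prefix_refl s
  | cons rel rest ih =>
    intro s
    exact (pvPrefix_addAll val rel s).trans (by simpa [pvFireB] using ih _)

theorem pvPrefix_passB (pending : List (List (Int × Int) × Nat)) :
    ∀ s : PySem.Set Int, s <+: (pvPassB pending s).1 := by
  induction pending with
  | nil => intro s; exact List.prefix_refl s
  | cons ent rest ih =>
    intro s
    simp only [pvPassB]
    split_ifs
    · exact ih s
    · exact (pvPrefix_fire ent.1 _ s).trans (ih _)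

theorem pvValid_of_prefix (ent : List (Int × Int) × Nat) (v w : List Int)
    (hp : v <+: w) (h : pvValid ent v) : pvValid ent w := by
  obtain ⟨t, rfl⟩ := hp
  refine ⟨le_trans h.1 (by simp), ?_⟩
  rw [List.take_append_of_le_length h.1]
  exact h.2

theorem pvRels_full (val : List (Int × Int)) (cur : Nat) (v : List Int)
    (hpw : val.Pairwise (fun a b => a.1 ≤ b.1))
    (hv : ∀ x ∈ v.take cur, pvFindA val x = none) :
    pvRelsB val (v.drop cur) = v.filterMap (pvFindA val) := by
  conv_rhs => rw [← List.take_append_drop cur v]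
  rw [List.filterMap_append]
  have h1 : (v.take cur).filterMap (pvFindA val) = [] :=
    List.filterMap_eq_nil_iff.mpr hv
  rw [h1, List.nil_append]
  exact List.filterMap_congr (fun vidx _ => pvFind_eq val vidx hpw)

theorem pvFire_eq_foldl (val : List (Int × Int)) (rels : List Int) (s : PySem.Set Int) :
    pvFireB val rels s = rels.foldl (fun s rel => pvAddAllA val rel s) s := rfl

-- one round of B (delta scans from valid cursors) equals one pass of A (full rescan),
-- and leaves the surviving entries with cursors again valid for the new index list
theorem pvPass_eq (items : List (String × List (Int × Int))) (hnd : (items.map (·.1)).Nodup) :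
    ∀ (vind : PySem.Set Int) (vis : PySem.Set String) (curs : List Nat),
    curs.length = (pvFilt items vis).length →
    (∀ p ∈ (pvFilt items vis).zip curs, pvValid p vind) →
    (pvPassB ((pvFilt items vis).zip curs) vind).1 = (pvPassA items (vind, vis)).1 ∧
    ∃ curs', curs'.length = (pvFilt items (pvPassA items (vind, vis)).2).length ∧
      (pvPassB ((pvFilt items vis).zip curs) vind).2 = (pvFilt items (pvPassA items (vind, vis)).2).zip curs' ∧
      ∀ p ∈ (pvFilt items (pvPassA items (vind, vis)).2).zip curs', pvValid p (pvPassA items (vind, vis)).1 := by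
  induction items with
  | nil =>
    intro vind vis curs _ _
    refine ⟨rfl, [], ?_, ?_, ?_⟩ <;> simp [pvFilt, pvPassB, pvPassA]
  | cons kv rest ih =>
    intro vind vis curs hlen hval
    simp only [List.map_cons, List.nodup_cons] at hnd
    by_cases hc : PySem.Set.contains vis kv.1 = true
    · rw [pvFilt_cons_skip kv rest vis hc] at hlen hval ⊢
      simp only [pvPassA, if_pos hc]
      have hfin := pvPassA_vis_mono rest vind vis kv.1 hc
      rw [pvFilt_cons_skip kv rest _ hfin]
      exact ih hnd.2 vind vis curs hlen hval
    · rw [pvFilt_cons_keep kv rest vis hc] at hlen hval ⊢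
      cases curs with
      | nil => simp at hlen
      | cons c curs0 =>
        simp only [List.length_cons, Nat.add_right_cancel_iff] at hlen
        simp only [List.zip_cons_cons] at hval ⊢
        set sval := PySem.List.sorted kv.2 (fun x => x.1) with hsval
        have hvhead : pvValid (sval, c) vind := hval (sval, c) (by simp)
        have hvtail : ∀ p ∈ (pvFilt rest vis).zip curs0, pvValid p vind :=
          fun p hp => hval p (by simp [hp])
        have hpw : sval.Pairwise (fun a b => a.1 ≤ b.1) :=
          PySem.List.sorted_pairwise kv.2 (fun x => x.1)
        have hrels : pvRelsB sval (vind.drop c) = vind.filterMap (pvFindA sval) :=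
          pvRels_full sval c vind hpw hvhead.2
        simp only [pvPassA, if_neg hc, pvInner_eq]
        simp only [pvPassB, hrels]
        by_cases he : (vind.filterMap (pvFindA sval)).isEmpty = true
        · rw [if_pos he, if_pos he, List.isEmpty_iff.mp he, List.foldl_nil]
          obtain ⟨h1, curs', hlen', h2, hval'⟩ := ih hnd.2 vind vis curs0 hlen hvtail
          have hfin : ¬ PySem.Set.contains (pvPassA rest (vind, vis)).2 kv.1 = true := by
            intro hcon
            rcases pvPassA_vis_bound rest vind vis kv.1 hcon with h' | h'
            · exact hc h'
            · exact hnd.1 (by simpa using h')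
          rw [pvFilt_cons_keep kv rest _ hfin]
          refine ⟨h1, vind.length :: curs', by simp [hlen'], by simp [h2, ← hsval], ?_⟩
          intro p hp
          simp only [List.zip_cons_cons, List.mem_cons] at hp
          rcases hp with rfl | hp
          · have hpre : vind <+: (pvPassA rest (vind, vis)).1 := by
              rw [← h1]; exact pvPrefix_passB _ vind
            have hall : ∀ x ∈ vind, pvFindA sval x = none :=
              List.filterMap_eq_nil_iff.mp (List.isEmpty_iff.mp he)
            obtain ⟨t, ht⟩ := hpre
            refine ⟨?_, ?_⟩
            · rw [← ht]; simp
            · rw [← ht, List.take_left]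
              exact hall
          · exact hval' p hp
        · rw [if_neg he, if_neg he]
          rw [pvFire_eq_foldl]
          set F := (vind.filterMap (pvFindA sval)).foldl (fun s rel => pvAddAllA sval rel s) vind with hF
          have hpreF : vind <+: F := by
            rw [hF, ← pvFire_eq_foldl]; exact pvPrefix_fire sval _ vind
          have hvtailF : ∀ p ∈ (pvFilt rest vis).zip curs0, pvValid p F :=
            fun p hp => pvValid_of_prefix p vind F hpreF (hvtail p hp)
          rw [← pvFilt_add_of_not_mem rest vis kv.1 (fun hm => hnd.1 (by simpa using hm))] at hlen hvtailF ⊢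
          obtain ⟨h1, curs', hlen', h2, hval'⟩ := ih hnd.2 F (PySem.Set.add vis kv.1) curs0 hlen hvtailF
          have hfin := pvPassA_vis_mono rest F (PySem.Set.add vis kv.1) kv.1 (pvSetContainsAddSelf vis kv.1)
          rw [pvFilt_cons_skip kv rest _ hfin]
          exact ⟨h1, curs', hlen', h2, hval'⟩

theorem pvLoop_eq (items : List (String × List (Int × Int))) (hnd : (items.map (·.1)).Nodup) :
    ∀ (fuel : Nat) (vind : PySem.Set Int) (vis : PySem.Set String) (curs : List Nat),
    curs.length = (pvFilt items vis).length →
    (∀ p ∈ (pvFilt items vis).zip curs, pvValid p vind) →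
    pvLoopB fuel vind ((pvFilt items vis).zip curs) = pvLoopA items fuel (vind, vis) := by
  intro fuel
  induction fuel with
  | zero => intro vind vis curs _ _; rfl
  | succ fuel ihf =>
    intro vind vis curs hlen hval
    obtain ⟨h1, curs', hlen', h2, hval'⟩ := pvPass_eq items hnd vind vis curs hlen hval
    simp only [pvLoopB, pvLoopA, h1, h2]
    split_ifs with h
    · rfl
    · exact ihf _ _ curs' hlen' hval'

theorem pvZipRep {α : Type} (l : List α) :
    l.zip (List.replicate l.length 0) = l.map (fun x => (x, (0 : Nat))) := by
  induction l with
  | nil => rfl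
  | cons x xs ih => simp [List.replicate_succ, ih]

-- ===== VERDICT (by name: the statement is the Claim_ definition above) =====
theorem get_vindices_spec : Claim_equal_get_vindices := by
  unfold Claim_equal_get_vindices
  intro lidx gs _ hpre
  unfold Spec_get_vindices Pre_get_vindices at *
  match gs, hpre with
  | g0 :: rest, _ =>
    unfold get_vindices get_vindices_alt
    rw [PySem.List.pyGet?_zero_cons]
    simp only []
    have hnd : (((PySem.Dict.ofList g0).items).map (·.1)).Nodup := by
      have : (((PySem.Dict.ofList g0).items).map (·.1)) = (PySem.Dict.ofList g0).keys := rfl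
      rw [this]
      exact PySem.Dict.nodup_keys_ofList g0
    have hpend : ((PySem.Dict.ofList g0).items).map (fun kv => (PySem.List.sorted kv.2 (fun x => x.1), (0 : Nat)))
        = (pvFilt (PySem.Dict.ofList g0).items PySem.Set.empty).zip
            (List.replicate (pvFilt (PySem.Dict.ofList g0).items PySem.Set.empty).length 0) := by
      rw [pvZipRep, pvFilt_empty, List.map_map]
      rfl
    rw [hpend]
    rw [pvLoop_eq _ hnd _ _ _ _ (by simp)
      (by intro p hp
          rw [pvZipRep] at hp
          simp only [List.mem_map] at hp
          obtain ⟨x, -, rfl⟩ := hp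
          exact ⟨Nat.zero_le _, by simp⟩)]
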